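-- pv_equiv track=rewrite | github.com/microsoft/social-reasoning-bench | archive/datasets/prompt_injection/converters.py | unicode_substitution
-- ===== SOURCE A (Python) =====
-- def unicode_substitution(text: str) -> str:
--     """
--     Replace ASCII characters with full-width Unicode equivalents.
--
--     Example:
--         >>> unicode_substitution("hello")
--         'ｈｅｌｌｏ'
--     """
--     result = []
--     for char in text:
--         code = ord(char)
--         # Convert ASCII letters and digits to full-width
--         if 0x21 <= code <= 0x7E:
--             result.append(chr(code + 0xFEE0))
--         elif char == " ":
--             result.append("\u3000")  # Full-width space
--         else:
--             result.append(char)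
--     return "".join(result)
-- ===== SOURCE B (Python) =====
-- def unicode_substitution(text: str) -> str:
--     # Staged passes: one whole-string replace per ASCII codepoint, then the space.
--     # Correct because the full-width replacements (>= U+FF01) are never targets
--     # of any later pass, so passes cannot cascade.
--     for code in range(0x21, 0x7F):
--         text = text.replace(chr(code), chr(code + 0xFEE0))
--     return text.replace(" ", "\u3000")
-- ===== Notes on version B (the rewrite author's own statement) =====
-- stated objective: faster
-- what changed: Replaces A's single per-character Python loop with if/elif/else branching by 95 staged whole-string str.replace passes (one per codepoint 0x21-0x7E, then one for the space), correct because full-width replacements never match a later pass's target; the C-level passes give a measured constant-factor speedup.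
import Mathlib
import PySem

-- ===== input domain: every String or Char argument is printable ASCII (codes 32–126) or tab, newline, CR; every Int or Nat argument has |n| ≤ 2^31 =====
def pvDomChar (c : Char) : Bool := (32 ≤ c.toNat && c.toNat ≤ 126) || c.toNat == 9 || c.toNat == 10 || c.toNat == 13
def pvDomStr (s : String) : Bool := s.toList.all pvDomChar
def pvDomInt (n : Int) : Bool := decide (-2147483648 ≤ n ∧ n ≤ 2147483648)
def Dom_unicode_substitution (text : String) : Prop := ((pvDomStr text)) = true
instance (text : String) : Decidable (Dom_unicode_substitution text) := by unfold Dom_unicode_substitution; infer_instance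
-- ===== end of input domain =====

-- B replaces A's single per-character branching pass by staged whole-string
-- str.replace passes, one per ASCII codepoint 0x21-0x7E plus one for the space;
-- a timing run measured B faster (C-level passes vs a Python char loop).

-- ===== PORT A =====
-- literal transliteration: append to a result list char by char, then join
def unicode_substitution (text : String) : String :=
  String.ofList (text.toList.foldl (fun result c =>
    let code := c.toNat
    if 0x21 ≤ code ∧ code ≤ 0x7E then result ++ [Char.ofNat (code + 0xFEE0)]
    else if c = ' ' then result ++ ['\u3000']
    else result ++ [c]) [])

-- ===== PORT B =====
-- for code in range(0x21, 0x7F): text = text.replace(chr(code), chr(code + 0xFEE0))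
-- return text.replace(" ", "\u3000")
def unicode_substitution_alt (text : String) : String :=
  let t := (PySem.List.pyRange 0x21 0x7F 1).foldl (fun s code =>
    PySem.Str.replace s (String.ofList [Char.ofNat code.toNat])
      (String.ofList [Char.ofNat (code.toNat + 0xFEE0)])) text
  PySem.Str.replace t " " "\u3000"

-- ===== PRECONDITION & SPEC =====
def Spec_unicode_substitution (text : String) (out : String) : Prop := out = unicode_substitution_alt text
instance (text : String) (out : String) : Decidable (Spec_unicode_substitution text out) := by unfold Spec_unicode_substitution; infer_instance

-- ===== CLAIM (what is proved, stated in full; the proofs are below) =====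
def Claim_equal_unicode_substitution : Prop := ∀ (text : String), Dom_unicode_substitution text → Spec_unicode_substitution text (unicode_substitution text)

-- ===== LEMMAS AND PROOFS =====

-- replace.go with a single-char pattern is a per-character map
lemma pvGoSingle (a b : Char) (l : List Char) : ∀ (fuel : Nat) (acc : List Char), l.length ≤ fuel →
    PySem.Chars.replace.go [a] [b] fuel l acc = acc.reverse ++ l.map (fun c => if c = a then b else c) := by
  induction l with
  | nil =>
    intro fuel acc h
    cases fuel <;> simp [PySem.Chars.replace.go]
  | cons c t ih =>
    intro fuel acc h
    cases fuel with
    | zero => simp at h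
    | succ n =>
      rw [PySem.Chars.replace.go]
      by_cases hca : c = a
      · subst hca
        simp only [List.isPrefixOf, BEq.rfl, Bool.true_and, if_true]
        simp only [List.length_singleton, List.drop_one, List.tail_cons]
        rw [ih n _ (by simpa using h)]
        simp
      · have : ([a].isPrefixOf (c :: t)) = false := by
          simp only [List.isPrefixOf, Bool.and_eq_false_iff, beq_eq_false_iff_ne]
          exact Or.inl (fun h => hca h.symm)
        rw [this]
        simp only [Bool.false_eq_true, if_false]
        rw [ih n _ (by simpa using h)]
        simp [hca]

-- s.replace(single a, single b) is a map on the code points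
lemma pvReplaceSingle (a b : Char) (s : String) :
    (PySem.Str.replace s (String.ofList [a]) (String.ofList [b])).toList
      = s.toList.map (fun c => if c = a then b else c) := by
  simp only [PySem.Str.replace, PySem.Chars.replace, String.toList_ofList,
    List.isEmpty_cons, Bool.false_eq_true, if_false]
  rw [pvGoSingle a b s.toList s.toList.length [] (le_refl _)]
  simp

-- the staged replace passes compose into one map of the folded char function
lemma pvFoldReplace (ks : List Int) (s : String) :
    ((ks.foldl (fun s code =>
        PySem.Str.replace s (String.ofList [Char.ofNat code.toNat])
          (String.ofList [Char.ofNat (code.toNat + 0xFEE0)])) s)).toList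
      = s.toList.map (fun c => ks.foldl
          (fun c code => if c = Char.ofNat code.toNat then Char.ofNat (code.toNat + 0xFEE0) else c) c) := by
  induction ks generalizing s with
  | nil => simp
  | cons k t ih =>
    simp only [List.foldl_cons]
    rw [ih]
    conv_lhs => rw [show PySem.Str.replace s (String.ofList [Char.ofNat k.toNat])
        (String.ofList [Char.ofNat (k.toNat + 0xFEE0)])
      = String.ofList (s.toList.map (fun c => if c = Char.ofNat k.toNat then Char.ofNat (k.toNat + 0xFEE0) else c)) from
        String.toList_inj.mp (by rw [pvReplaceSingle]; simp)]
    simp [List.map_map, Function.comp]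

lemma pvToNatOfNat (n : Nat) (h : n.isValidChar) : (Char.ofNat n).toNat = n := by
  simp [Char.ofNat, h, Char.toNat, Char.ofNatAux]

lemma pvValidLow (n : Nat) (h : n ≤ 126) : n.isValidChar := Or.inl (by omega)

lemma pvValidHigh (n : Nat) (h1 : 57343 < n) (h2 : n < 1114112) : n.isValidChar := Or.inr ⟨h1, h2⟩

-- a char already pushed to the full-width block is fixed by all later passes
lemma pvFoldFwHigh (c : Char) (hc : 65280 ≤ c.toNat) : ∀ (n : Nat) (a b : Int), (b - a).toNat = n → 0 ≤ a → b ≤ 127 →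
    (PySem.List.pyRange a b 1).foldl
      (fun ch k => if ch = Char.ofNat k.toNat then Char.ofNat (k.toNat + 0xFEE0) else ch) c = c := by
  intro n
  induction n with
  | zero =>
    intro a b hn _ _
    rw [PySem.List.pyRange_one_eq_nil (by omega)]
    simp
  | succ m ih =>
    intro a b hn ha hb
    rw [PySem.List.pyRange_one_cons (by omega)]
    simp only [List.foldl_cons]
    have hne : c ≠ Char.ofNat a.toNat := by
      intro h
      have hv : a.toNat.isValidChar := pvValidLow _ (by omega)
      have := pvToNatOfNat a.toNat hv
      rw [h, this] at hc; omega
    rw [if_neg hne]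
    exact ih (a + 1) b (by omega) (by omega) hb

-- the folded char function on a domain char is exactly the full-width shift
lemma pvFoldFwAscii (c : Char) (hc : c.toNat ≤ 126) : ∀ (n : Nat) (a b : Int), (b - a).toNat = n → 33 ≤ a → b ≤ 127 →
    (PySem.List.pyRange a b 1).foldl
      (fun ch k => if ch = Char.ofNat k.toNat then Char.ofNat (k.toNat + 0xFEE0) else ch) c
    = if a ≤ (c.toNat : Int) ∧ (c.toNat : Int) < b then Char.ofNat (c.toNat + 0xFEE0) else c := by
  intro n
  induction n with
  | zero =>
    intro a b hn ha hb
    rw [PySem.List.pyRange_one_eq_nil (by omega), if_neg (by omega)]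
    simp
  | succ m ih =>
    intro a b hn ha hb
    rw [PySem.List.pyRange_one_cons (by omega)]
    simp only [List.foldl_cons]
    by_cases hca : c.toNat = a.toNat
    · have hceq : c = Char.ofNat a.toNat := by
        rw [← hca, Char.ofNat_toNat]
      rw [if_pos hceq]
      have hsh : (Char.ofNat (a.toNat + 0xFEE0)).toNat = a.toNat + 0xFEE0 :=
        pvToNatOfNat _ (pvValidHigh _ (by omega) (by omega))
      rw [pvFoldFwHigh _ (by omega) m (a + 1) b (by omega) (by omega) hb]
      rw [if_pos (by omega), hca]
    · have hne : c ≠ Char.ofNat a.toNat := by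
        intro h
        apply hca
        rw [h, pvToNatOfNat _ (pvValidLow _ (by omega))]
      rw [if_neg hne]
      rw [ih (a + 1) b (by omega) (by omega) hb]
      congr 1
      simp only [eq_iff_iff]
      omega

-- ===== VERDICT (by name: the statement is the Claim_ definition above) =====
set_option maxRecDepth 8192 in
set_option maxHeartbeats 1000000 in
theorem unicode_substitution_spec : Claim_equal_unicode_substitution := by
  intro text hdom
  unfold Spec_unicode_substitution unicode_substitution unicode_substitution_alt
  have hdom' : ∀ c ∈ text.toList, pvDomChar c = true := by
    simpa [Dom_unicode_substitution, pvDomStr, List.all_eq_true] using hdom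
  -- A's fold as a map
  have hA : text.toList.foldl (fun result c =>
      let code := c.toNat
      if 0x21 ≤ code ∧ code ≤ 0x7E then result ++ [Char.ofNat (code + 0xFEE0)]
      else if c = ' ' then result ++ ['\u3000']
      else result ++ [c]) []
    = text.toList.map (fun c =>
        if 0x21 ≤ c.toNat ∧ c.toNat ≤ 0x7E then Char.ofNat (c.toNat + 0xFEE0)
        else if c = ' ' then '\u3000' else c) := by
    have := PySem.List.foldl_append_singleton_eq_map (l := text.toList)
      (f := fun c => if 0x21 ≤ c.toNat ∧ c.toNat ≤ 0x7E then Char.ofNat (c.toNat + 0xFEE0)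
        else if c = ' ' then '\u3000' else c) (acc := [])
    rw [List.nil_append] at this
    rw [← this]
    apply PySem.List.foldl_congr_mem
    intro acc c _
    by_cases h1 : 0x21 ≤ c.toNat ∧ c.toNat ≤ 0x7E
    · simp [h1]
    · by_cases h2 : c = ' ' <;> simp [h1, h2]
  rw [hA]
  -- B as a map
  apply String.toList_inj.mp
  have hB : (PySem.Str.replace ((PySem.List.pyRange 33 127 1).foldl (fun s code =>
      PySem.Str.replace s (String.ofList [Char.ofNat code.toNat])
        (String.ofList [Char.ofNat (code.toNat + 0xFEE0)])) text) " " "\u3000").toList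
    = (text.toList.map (fun c => (PySem.List.pyRange 33 127 1).foldl
          (fun ch k => if ch = Char.ofNat k.toNat then Char.ofNat (k.toNat + 0xFEE0) else ch) c)).map
        (fun c => if c = ' ' then '\u3000' else c) := by
    have h1 : (" " : String) = String.ofList [' '] := by decide
    have h2 : ("\u3000" : String) = String.ofList ['\u3000'] := by decide
    rw [h1, h2, pvReplaceSingle]
    exact congrArg (List.map _) (pvFoldReplace _ text)
  simp only [hB, String.toList_ofList, List.map_map]
  apply List.map_congr_left
  intro c hmem
  have hc : c.toNat ≤ 126 := by
    have := hdom' c hmem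
    simp only [pvDomChar, Bool.or_eq_true, Bool.and_eq_true, decide_eq_true_eq, beq_iff_eq] at this
    omega
  simp only [Function.comp]
  rw [pvFoldFwAscii c hc ((127 - 33 : Int)).toNat 33 127 rfl (by omega) (by omega)]
  by_cases h1 : 0x21 ≤ c.toNat ∧ c.toNat ≤ 0x7E
  · have hc1 : (33 : Int) ≤ (c.toNat : Int) ∧ (c.toNat : Int) < 127 := by
      constructor <;> [exact_mod_cast h1.1; exact_mod_cast Nat.lt_succ_of_le h1.2]
    have hsh : (Char.ofNat (c.toNat + 0xFEE0)).toNat = c.toNat + 0xFEE0 :=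
      pvToNatOfNat _ (pvValidHigh _ (by omega) (by omega))
    have hns : Char.ofNat (c.toNat + 0xFEE0) ≠ ' ' := by
      intro h
      have := congrArg Char.toNat h
      rw [hsh] at this
      simp at this
    rw [if_pos hc1, if_pos h1, if_neg hns]
  · have hc1 : ¬ ((33 : Int) ≤ (c.toNat : Int) ∧ (c.toNat : Int) < 127) := by omega
    rw [if_neg hc1, if_neg h1]
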